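-- pv_equiv track=rewrite | github.com/posl/comment_recommendation | script/split_gen/1_time/zh/234_C/3.py | find_kth_0_2_number
-- ===== SOURCE A (Python) =====
-- def find_kth_0_2_number(k):
--     # 2是第一个数
--     if k == 1:
--         return 2
--     # 20是第二个数
--     if k == 2:
--         return 20
--     # 22是第三个数
--     if k == 3:
--         return 22
--     # 从第四个数开始，每次加2
--     k -= 3
--     num = 22
--     while k > 0:
--         num += 2
--         if '1' not in str(num) and '3' not in str(num) and '4' not in str(num) and '5' not in str(num) and '6' not in str(num) and '7' not in str(num) and '8' not in str(num) and '9' not in str(num):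
--             k -= 1
--     return num
-- ===== SOURCE B (Python) =====
-- # k-th positive integer whose decimal digits are all 0 or 2 = binary digits of k written with 2s:
-- # build it from k's bits in one O(log k) loop instead of A's scan over every even number up to the answer.
-- def find_kth_0_2_number(k):
--     num = 0
--     place = 1
--     while k > 0:
--         if k % 2:
--             num += 2 * place
--         k //= 2
--         place *= 10
--     return num
-- ===== Notes on version B (the rewrite author's own statement) =====
-- stated objective: faster
-- what changed: B builds the answer directly from k's binary digits (each bit 1 becomes decimal digit 2) in one O(log k) loop, replacing A's scan that steps through every even number up to the answer and string-tests its digits.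
-- outside the precondition, e.g. on find_kth_0_2_number(0): A returns 22, B returns 0; on find_kth_0_2_number(-3): A returns 22, B returns 0
import Mathlib
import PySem

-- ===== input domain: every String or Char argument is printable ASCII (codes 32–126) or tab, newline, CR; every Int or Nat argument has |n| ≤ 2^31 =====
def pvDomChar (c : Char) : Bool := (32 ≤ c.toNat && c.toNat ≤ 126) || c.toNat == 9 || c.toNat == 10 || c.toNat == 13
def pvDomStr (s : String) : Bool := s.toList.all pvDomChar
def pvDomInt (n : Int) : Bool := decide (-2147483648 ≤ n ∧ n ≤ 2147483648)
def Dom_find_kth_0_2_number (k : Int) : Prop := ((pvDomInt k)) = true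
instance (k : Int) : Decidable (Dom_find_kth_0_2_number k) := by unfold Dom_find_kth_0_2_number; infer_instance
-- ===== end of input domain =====

-- B builds the answer directly from k's binary digits (bit 1 ↦ decimal digit 2) instead of
-- A's scan that increments by 2 and tests every number's decimal string; asymptotically faster.

-- ===== PORT A =====
-- the digit test of A's while-body: '1' not in str(num) and '3' not in str(num) and … and '9' not in str(num)
def pvCondA (num : Int) : Bool :=
  !(PySem.Str.isIn "1" (PySem.Int.toStr num)) &&
  !(PySem.Str.isIn "3" (PySem.Int.toStr num)) &&
  !(PySem.Str.isIn "4" (PySem.Int.toStr num)) &&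
  !(PySem.Str.isIn "5" (PySem.Int.toStr num)) &&
  !(PySem.Str.isIn "6" (PySem.Int.toStr num)) &&
  !(PySem.Str.isIn "7" (PySem.Int.toStr num)) &&
  !(PySem.Str.isIn "8" (PySem.Int.toStr num)) &&
  !(PySem.Str.isIn "9" (PySem.Int.toStr num))

-- A's while-loop; the fuel only makes the recursion total: 10^33 exceeds the number of
-- iterations for every |k| ≤ 2^31 (proved in pvLoopA_eq below), so it never runs out on Dom.
def pvLoopA : Nat → Int → Int → Int
  | 0, _, num => num
  | fuel + 1, k, num =>
    if k > 0 then
      if pvCondA (num + 2) then pvLoopA fuel (k - 1) (num + 2)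
      else pvLoopA fuel k (num + 2)
    else num

def find_kth_0_2_number (k : Int) : Int :=
  if k = 1 then 2
  else if k = 2 then 20
  else if k = 3 then 22
  else pvLoopA (10 ^ 33) (k - 3) 22

-- ===== PORT B =====
-- B's while-loop: peel k's binary digits, writing digit 2·bit at the current decimal place
def pvLoopB (k num place : Int) : Int :=
  if k > 0 then
    pvLoopB (PySem.Int.floordiv k 2)
      (if PySem.Int.mod k 2 ≠ 0 then num + 2 * place else num)
      (place * 10)
  else num
termination_by k.toNat
decreasing_by
  rename_i h
  rw [PySem.Int.floordiv_eq_ediv_of_pos (by omega)]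
  omega

def find_kth_0_2_number_alt (k : Int) : Int := pvLoopB k 0 1

-- ===== PRECONDITION & SPEC =====
-- Pre_ restricts to the function's natural domain k ≥ 1: for k ≤ 0 there is no k-th
-- 0/2-digit number to find and no return value is specified (A happens to return 22 there,
-- B returns 0); see claim.json cites.
def Pre_find_kth_0_2_number (k : Int) : Prop := 1 ≤ k
instance (k : Int) : Decidable (Pre_find_kth_0_2_number k) := by unfold Pre_find_kth_0_2_number; infer_instance

def pvWitness_find_kth_0_2_number : Int := 5

def Spec_find_kth_0_2_number (k : Int) (out : Int) : Prop := out = find_kth_0_2_number_alt k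
instance (k : Int) (out : Int) : Decidable (Spec_find_kth_0_2_number k out) := by unfold Spec_find_kth_0_2_number; infer_instance

-- ===== CLAIM (what is proved, stated in full; the proofs are below) =====
def Claim_equal_find_kth_0_2_number : Prop := ∀ (k : Int), Dom_find_kth_0_2_number k → Pre_find_kth_0_2_number k → Spec_find_kth_0_2_number k (find_kth_0_2_number k)

-- ===== LEMMAS AND PROOFS =====

-- value whose decimal digits are the binary digits of m (the mathematical yardstick both
-- ports are measured against; 2 * pvH m is the m-th positive number with digits in {0,2})
def pvH : Nat → Nat
  | 0 => 0
  | m + 1 => (m + 1) % 2 + 10 * pvH ((m + 1) / 2)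

def pvOnly02 (n : Nat) : Prop := ∀ d ∈ Nat.digits 10 n, d = 0 ∨ d = 2

theorem pvH_rec (m : Nat) (h : 0 < m) : pvH m = m % 2 + 10 * pvH (m / 2) := by
  cases m with
  | zero => omega
  | succ m => simp [pvH]

theorem pvH_pos (m : Nat) (h : 0 < m) : 0 < pvH m := by
  induction m using Nat.strong_induction_on with
  | _ m ih =>
    rw [pvH_rec m h]
    rcases Nat.lt_or_ge m 2 with h2 | h2
    · interval_cases m; simp [pvH]
    · have := ih (m / 2) (by omega) (by omega)
      omega

theorem pvH_mono {a b : Nat} (h : a < b) : pvH a < pvH b := by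
  induction b using Nat.strong_induction_on generalizing a with
  | _ b ih =>
    have hb : 0 < b := by omega
    rw [pvH_rec b hb]
    rcases Nat.eq_zero_or_pos a with rfl | ha
    · have hpos := pvH_pos b hb
      rw [pvH_rec b hb] at hpos
      simpa [pvH] using hpos
    · rw [pvH_rec a ha]
      rcases Nat.lt_or_ge (a / 2) (b / 2) with hd | hd
      · have := ih (b / 2) (by omega) hd
        omega
      · have hd2 : a / 2 = b / 2 := by omega
        rw [hd2]
        omega

theorem pvH_mono_le {a b : Nat} (h : a ≤ b) : pvH a ≤ pvH b := by
  rcases Nat.eq_or_lt_of_le h with rfl | h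
  · exact le_refl _
  · exact le_of_lt (pvH_mono h)

theorem pvH_bound (t m : Nat) (h : m < 2 ^ t) : pvH m < 10 ^ t := by
  induction t generalizing m with
  | zero => interval_cases m; simp [pvH]
  | succ t ih =>
    rcases Nat.eq_zero_or_pos m with rfl | hm
    · have : (0:Nat) < 10 ^ (t+1) := pow_pos (by norm_num) _
      simp only [pvH]
      exact this
    · rw [pvH_rec m hm]
      have h2 : m / 2 < 2 ^ t := by omega
      have hih := ih (m / 2) h2
      have hp : (0:Nat) < 10 ^ t := pow_pos (by norm_num) _
      calc m % 2 + 10 * pvH (m / 2) ≤ 1 + 10 * (10 ^ t - 1) := by omega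
        _ < 10 ^ (t + 1) := by rw [pow_succ]; omega

theorem pvG_mod_div (m : Nat) (hm : 0 < m) :
    2 * pvH m % 10 = 2 * (m % 2) ∧ 2 * pvH m / 10 = 2 * pvH (m / 2) := by
  have := pvH_rec m hm
  omega

-- every 2·pvH m has only digits 0 and 2
theorem pvOnly02_G (m : Nat) : pvOnly02 (2 * pvH m) := by
  induction m using Nat.strong_induction_on with
  | _ m ih =>
    rcases Nat.eq_zero_or_pos m with rfl | hm
    · intro d hd; simp [pvH] at hd
    · intro d hd
      obtain ⟨hmod, hdiv⟩ := pvG_mod_div m hm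
      have hpos : 0 < 2 * pvH m := by have := pvH_pos m hm; omega
      rw [Nat.digits_def' (by norm_num : (1:Nat) < 10) hpos, hmod, hdiv] at hd
      rcases List.mem_cons.mp hd with rfl | hd'
      · omega
      · exact ih (m / 2) (by omega) d hd'

-- every number with only digits 0 and 2 is some 2·pvH m
theorem pvG_of_only02 (n : Nat) (h : pvOnly02 n) : ∃ m, n = 2 * pvH m := by
  induction n using Nat.strong_induction_on with
  | _ n ih =>
    rcases Nat.eq_zero_or_pos n with rfl | hn
    · exact ⟨0, by simp [pvH]⟩
    · have hdig := Nat.digits_def' (by norm_num : (1:Nat) < 10) hn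
      have hhead : n % 10 = 0 ∨ n % 10 = 2 := h (n % 10) (by rw [hdig]; exact List.mem_cons_self)
      have htail : pvOnly02 (n / 10) := fun d hd => h d (by rw [hdig]; exact List.mem_cons_of_mem _ hd)
      obtain ⟨m', hm'⟩ := ih (n / 10) (by omega) htail
      refine ⟨2 * m' + n % 10 / 2, ?_⟩
      have hmpos : 0 < 2 * m' + n % 10 / 2 := by
        rcases hhead with h0 | h2
        · have hq : 0 < n / 10 := by omega
          have hph : 0 < pvH m' := by omega
          have : 0 < m' := by
            by_contra hc
            rw [show m' = 0 by omega] at hph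
            simp [pvH] at hph
          omega
        · omega
      rw [pvH_rec _ hmpos,
        show (2 * m' + n % 10 / 2) % 2 = n % 10 / 2 by omega,
        show (2 * m' + n % 10 / 2) / 2 = m' by omega]
      omega

-- the successor gap: nothing with only digits 0/2 lies strictly between 2·pvH m and 2·pvH (m+1)
theorem pvG_next (n m : Nat) (h : pvOnly02 n) (hgt : 2 * pvH m < n) : 2 * pvH (m + 1) ≤ n := by
  obtain ⟨m', rfl⟩ := pvG_of_only02 n h
  have hlt : m < m' := by
    by_contra hc
    have := pvH_mono_le (show m' ≤ m by omega)
    omega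
  have := pvH_mono_le (show m + 1 ≤ m' by omega)
  omega

-- Nat.toDigits is the decimal digits, low-to-high reversed, as characters
theorem pvToDigitsCore_eq (fuel : Nat) : ∀ (n : Nat) (ds : List Char), 0 < n → n < fuel →
    Nat.toDigitsCore 10 fuel n ds = ((Nat.digits 10 n).map Nat.digitChar).reverse ++ ds := by
  induction fuel with
  | zero => intro n ds h1 h2; omega
  | succ fuel ih =>
    intro n ds h1 h2
    rw [Nat.toDigitsCore, Nat.digits_def' (by norm_num : (1:Nat) < 10) h1]
    by_cases hz : n / 10 = 0
    · simp [hz, Nat.digits_zero]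
    · have h1' : 0 < n / 10 := Nat.pos_of_ne_zero hz
      have h2' : n / 10 < fuel := by omega
      rw [if_neg hz, ih (n / 10) _ h1' h2']
      simp

theorem pvMem_toDigits (n : Nat) (h : 0 < n) (c : Char) :
    c ∈ Nat.toDigits 10 n ↔ ∃ d ∈ Nat.digits 10 n, Nat.digitChar d = c := by
  rw [Nat.toDigits, pvToDigitsCore_eq (n + 1) n [] h (by omega)]
  simp [eq_comm]

-- bridge: A's eight string tests say exactly "only digits 0 and 2" for positive num
theorem pvCondA_iff (num : Int) (h : 0 < num) : pvCondA num = true ↔ pvOnly02 num.toNat := by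
  have hpos : 0 < num.toNat := by omega
  have hs : (PySem.Int.toStr num).toList = Nat.toDigits 10 num.toNat := by
    rw [PySem.Int.toList_toStr, PySem.Int.toChars, if_neg (by omega)]
  have hmem : ∀ (c : Char) (s : String), s.toList = [c] →
      (PySem.Str.isIn s (PySem.Int.toStr num) = false ↔
        ¬ (∃ d ∈ Nat.digits 10 num.toNat, Nat.digitChar d = c)) := by
    intro c s hsc
    rw [show PySem.Str.isIn s (PySem.Int.toStr num) =
        PySem.Chars.isIn s.toList (PySem.Int.toStr num).toList from rfl, hsc, hs,
      PySem.Chars.isIn_eq_false_iff, List.singleton_infix_iff]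
    exact not_congr (pvMem_toDigits num.toNat hpos c)
  simp only [pvCondA, Bool.and_eq_true, Bool.not_eq_true',
    hmem '1' "1" (by decide), hmem '3' "3" (by decide), hmem '4' "4" (by decide),
    hmem '5' "5" (by decide), hmem '6' "6" (by decide), hmem '7' "7" (by decide),
    hmem '8' "8" (by decide), hmem '9' "9" (by decide)]
  constructor
  · rintro ⟨⟨⟨⟨⟨⟨⟨h1, h3⟩, h4⟩, h5⟩, h6⟩, h7⟩, h8⟩, h9⟩ d hd
    have hlt : d < 10 := Nat.digits_lt_base (by norm_num) hd
    interval_cases d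
    · exact Or.inl rfl
    · exact absurd ⟨1, hd, rfl⟩ h1
    · exact Or.inr rfl
    · exact absurd ⟨3, hd, rfl⟩ h3
    · exact absurd ⟨4, hd, rfl⟩ h4
    · exact absurd ⟨5, hd, rfl⟩ h5
    · exact absurd ⟨6, hd, rfl⟩ h6
    · exact absurd ⟨7, hd, rfl⟩ h7
    · exact absurd ⟨8, hd, rfl⟩ h8
    · exact absurd ⟨9, hd, rfl⟩ h9
  · intro h02
    repeat' apply And.intro
    all_goals
      rintro ⟨d, hd, hc⟩
      rcases h02 d hd with rfl | rfl <;> simp [Nat.digitChar] at hc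

theorem pvLoopA_nonpos (fuel : Nat) (k num : Int) (hk : k ≤ 0) : pvLoopA fuel k num = num := by
  cases fuel with
  | zero => rfl
  | succ fuel => simp [pvLoopA, show ¬ (0:Int) < k by omega]

-- the loop invariant of A: from an even num in [2·pvH m, 2·pvH (m+1)) with k > 0 counts
-- left and enough fuel, the loop returns the (m+k)-th value
theorem pvLoopA_eq (fuel : Nat) : ∀ (k : Int) (m : Nat) (num : Int), 0 < k →
    ((2 * pvH m : Nat) : Int) ≤ num → num < ((2 * pvH (m + 1) : Nat) : Int) → 2 ∣ num →
    ((2 * pvH (m + k.toNat) : Nat) : Int) ≤ (fuel : Int) * 2 + num →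
    pvLoopA fuel k num = ((2 * pvH (m + k.toNat) : Nat) : Int) := by
  induction fuel with
  | zero =>
    intro k m num hk hlo hhi _ hfuel
    exfalso
    have hc : ((2 * pvH (m + 1) : Nat) : Int) ≤ ((2 * pvH (m + k.toNat) : Nat) : Int) := by
      have := pvH_mono_le (show m + 1 ≤ m + k.toNat by omega)
      exact_mod_cast by omega
    simp only [Nat.cast_zero] at hfuel
    omega
  | succ fuel ih =>
    intro k m num hk hlo hhi heven hfuel
    have hnn : (0:Int) ≤ ((2 * pvH m : Nat) : Int) := Int.natCast_nonneg _
    have hnum_pos : 0 < num + 2 := by omega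
    have heven1 : 2 ∣ ((2 * pvH (m + 1) : Nat) : Int) := ⟨(pvH (m + 1) : Int), by push_cast; ring⟩
    have hle : num + 2 ≤ ((2 * pvH (m + 1) : Nat) : Int) := by omega
    have hfuel' : ((2 * pvH (m + k.toNat) : Nat) : Int) ≤ (fuel : Int) * 2 + (num + 2) := by
      push_cast at hfuel ⊢
      omega
    rw [pvLoopA, if_pos hk]
    by_cases hEq : num + 2 = ((2 * pvH (m + 1) : Nat) : Int)
    · have hcond : pvCondA (num + 2) = true := by
        rw [pvCondA_iff _ hnum_pos, show (num + 2).toNat = 2 * pvH (m + 1) by omega]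
        exact pvOnly02_G (m + 1)
      rw [hcond, if_pos rfl]
      by_cases hk1 : k = 1
      · subst hk1
        rw [pvLoopA_nonpos _ _ _ (by omega)]
        rw [show m + (1:Int).toNat = m + 1 by omega]
        exact hEq
      · have hidx : m + 1 + (k - 1).toNat = m + k.toNat := by omega
        rw [← hidx] at hfuel' ⊢
        refine ih (k - 1) (m + 1) (num + 2) (by omega) (le_of_eq hEq.symm) ?_ (by omega) hfuel'
        have h2 : (2 * pvH (m + 1) : Nat) < 2 * pvH (m + 1 + 1) := by
          have := pvH_mono (show m + 1 < m + 1 + 1 by omega)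
          omega
        rw [hEq]
        exact_mod_cast h2
    · have hlt : num + 2 < ((2 * pvH (m + 1) : Nat) : Int) := lt_of_le_of_ne hle hEq
      have hcond : pvCondA (num + 2) = false := by
        rw [Bool.eq_false_iff]
        intro hc
        have h02 : pvOnly02 (num + 2).toNat := (pvCondA_iff _ hnum_pos).mp hc
        have hnext := pvG_next (num + 2).toNat m h02 (by omega)
        omega
      rw [hcond, if_neg (by simp)]
      exact ih k m (num + 2) hk (by omega) hlt (by omega) hfuel'

-- B's loop computes num + place · (2·pvH k) for k ≥ 0
theorem pvLoopB_eq (K : Nat) : ∀ (num place : Int),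
    pvLoopB (K : Int) num place = num + place * (2 * pvH K : Nat) := by
  induction K using Nat.strong_induction_on with
  | _ K ih =>
    intro num place
    rcases Nat.eq_zero_or_pos K with rfl | hK
    · rw [pvLoopB]; simp [pvH]
    · rw [pvLoopB, if_pos (by exact_mod_cast hK)]
      rw [show PySem.Int.floordiv (K : Int) 2 = ((K / 2 : Nat) : Int) from
        PySem.Int.floordiv_natCast K 2]
      rw [show PySem.Int.mod (K : Int) 2 = ((K % 2 : Nat) : Int) from PySem.Int.mod_natCast K 2]
      rw [ih (K / 2) (by omega)]
      rw [pvH_rec K hK]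
      rcases Nat.mod_two_eq_zero_or_one K with h2 | h2
      · rw [if_neg (by simp [h2])]
        push_cast [pvH_rec K hK, h2]
        ring
      · rw [if_pos (by simp [h2])]
        push_cast [pvH_rec K hK, h2]
        ring

-- ===== VERDICT (by name: the statement is the Claim_ definition above) =====
theorem find_kth_0_2_number_spec : Claim_equal_find_kth_0_2_number := by
  intro k hDom hPre
  unfold Spec_find_kth_0_2_number
  have hk1 : 1 ≤ k := hPre
  have hkle : k ≤ 2147483648 := by
    simp only [Dom_find_kth_0_2_number, pvDomInt, decide_eq_true_eq] at hDom
    exact hDom.2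
  have hB : find_kth_0_2_number_alt k = ((2 * pvH k.toNat : Nat) : Int) := by
    unfold find_kth_0_2_number_alt
    have hb := pvLoopB_eq k.toNat 0 1
    rw [show ((k.toNat : Nat) : Int) = k by omega] at hb
    rw [hb]
    ring
  rw [hB]
  unfold find_kth_0_2_number
  have e0 : pvH 0 = 0 := by simp [pvH]
  have e1 : pvH 1 = 1 := by rw [pvH_rec 1 (by norm_num)]; norm_num [e0]
  have e2 : pvH 2 = 10 := by rw [pvH_rec 2 (by norm_num)]; norm_num [e1]
  have e3 : pvH 3 = 11 := by rw [pvH_rec 3 (by norm_num)]; norm_num [e1]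
  have e4 : pvH 4 = 100 := by rw [pvH_rec 4 (by norm_num)]; norm_num [e2]
  by_cases h1 : k = 1
  · subst h1; norm_num [show (1:Int).toNat = 1 from rfl, e1]
  by_cases h2 : k = 2
  · subst h2; norm_num [show (2:Int).toNat = 2 from rfl, e2]
  by_cases h3 : k = 3
  · subst h3; norm_num [show (3:Int).toNat = 3 from rfl, e3]
  rw [if_neg h1, if_neg h2, if_neg h3]
  have hk4 : 4 ≤ k := by omega
  have hidx : 3 + (k - 3).toNat = k.toNat := by omega
  have hbound : pvH k.toNat < 10 ^ 32 := by
    refine pvH_bound 32 k.toNat ?_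
    have : (2:Nat) ^ 32 = 4294967296 := by norm_num
    omega
  have hfuel : ((2 * pvH (3 + (k - 3).toNat) : Nat) : Int) ≤ ((10 ^ 33 : Nat) : Int) * 2 + 22 := by
    rw [hidx]
    have h33 : ((10 ^ 33 : Nat) : Int) = 10 ^ 33 := by norm_num
    have h32 : (10:Nat) ^ 32 ≤ 10 ^ 33 := by norm_num
    push_cast
    omega
  have hA := pvLoopA_eq (10 ^ 33) (k - 3) 3 22 (by omega)
    (by norm_num [e3]) (by norm_num [e4]) (by norm_num) hfuel
  rw [hidx] at hA
  exact hA
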